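-- pv_equiv track=rewrite | github.com/Gopinath5002/Altruisty-Coding-Challenge | Question2.py | qsn2
-- ===== SOURCE A (Python) =====
-- def qsn2(s,st_idx,end_idx):
--     combined=zip(st_idx,end_idx)
--     arr=[]
--     for (i,j) in combined:
--         post=False
--         ans=0
--         temp=0
--         for k in s[i-1:j]:
--             if k=='|':
--                 ans+=temp
--                 temp=0
--                 post=True
--             if post and k=='*':
--                 temp+=1
--         arr.append(ans)
--     return arr
-- ===== SOURCE B (Python) =====
-- def qsn2(s, st_idx, end_idx):
--     # Locate the first and last pipe of each query slice with str.find/str.rfind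
--     # and count the stars between them with str.count, instead of A's stateful scan.
--     arr = []
--     for i, j in zip(st_idx, end_idx):
--         t = s[i - 1:j]
--         f = t.find('|')
--         if f == -1:
--             arr.append(0)
--         else:
--             arr.append(t[f:t.rfind('|')].count('*'))
--     return arr
-- ===== Notes on version B (the rewrite author's own statement) =====
-- stated objective: faster
-- what changed: Replaced A's stateful per-character scan (post/ans/temp counters) of each query slice by locating the slice's first and last pipe with str.find/str.rfind and counting the stars between them with str.count.
import Mathlib
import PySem

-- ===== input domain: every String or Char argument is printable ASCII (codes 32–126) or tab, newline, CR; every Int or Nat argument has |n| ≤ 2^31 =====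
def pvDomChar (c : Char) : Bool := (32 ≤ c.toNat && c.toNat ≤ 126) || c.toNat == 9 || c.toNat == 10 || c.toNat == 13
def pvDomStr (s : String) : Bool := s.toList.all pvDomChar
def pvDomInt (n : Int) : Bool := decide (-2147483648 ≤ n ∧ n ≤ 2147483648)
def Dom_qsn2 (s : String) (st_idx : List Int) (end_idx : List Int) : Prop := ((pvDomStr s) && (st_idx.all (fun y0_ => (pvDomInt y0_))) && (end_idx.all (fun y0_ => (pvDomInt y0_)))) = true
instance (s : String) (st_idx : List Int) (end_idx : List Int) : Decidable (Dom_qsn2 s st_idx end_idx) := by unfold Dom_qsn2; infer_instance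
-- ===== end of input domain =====

-- B replaces A's stateful per-character scan of each query slice by str.find/str.rfind of
-- the outer pipes plus str.count of the stars between them; return values proved equal on all inputs.

-- ===== PORT A =====
-- the body of A's inner 'for k in s[i-1:j]' loop, on state (post, ans, temp)
def qsn2Step (st : Bool × Int × Int) (k : Char) : Bool × Int × Int :=
  let st1 := if k = '|' then (true, st.2.1 + st.2.2, (0 : Int)) else st
  if st1.1 && decide (k = '*') then (st1.1, st1.2.1, st1.2.2 + 1) else st1

def qsn2 (s : String) (st_idx : List Int) (end_idx : List Int) : List Int :=
  (st_idx.zip end_idx).foldl (fun arr ij =>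
    let t := PySem.List.slice s.toList (some (ij.1 - 1)) (some ij.2)
    arr ++ [(t.foldl qsn2Step (false, 0, 0)).2.1]) []

-- ===== PORT B =====
-- per-slice answer of Source B: f = t.find('|'); 0 if f == -1 else t[f:t.rfind('|')].count('*')
def qsn2AltAns (t : List Char) : Int :=
  let f := PySem.Chars.find t ['|']
  if f = -1 then 0
  else ((PySem.Chars.count (PySem.List.slice t (some f) (some (PySem.Chars.rfind t ['|']))) ['*'] : Nat) : Int)

def qsn2_alt (s : String) (st_idx : List Int) (end_idx : List Int) : List Int :=
  (st_idx.zip end_idx).foldl (fun arr ij =>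
    arr ++ [qsn2AltAns (PySem.List.slice s.toList (some (ij.1 - 1)) (some ij.2))]) []

-- ===== PRECONDITION & SPEC =====
def Spec_qsn2 (s : String) (st_idx : List Int) (end_idx : List Int) (out : List Int) : Prop := out = qsn2_alt s st_idx end_idx
instance (s : String) (st_idx : List Int) (end_idx : List Int) (out : List Int) : Decidable (Spec_qsn2 s st_idx end_idx out) := by unfold Spec_qsn2; infer_instance

-- ===== CLAIM (what is proved, stated in full; the proofs are below) =====
def Claim_equal_qsn2 : Prop := ∀ (s : String) (st_idx : List Int) (end_idx : List Int), Dom_qsn2 s st_idx end_idx → Spec_qsn2 s st_idx end_idx (qsn2 s st_idx end_idx)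

-- ===== LEMMAS AND PROOFS =====

-- star count of a char list, as an Int
def pvStars (u : List Char) : Int := (u.count '*' : Int)
theorem pvStars_nil : pvStars [] = 0 := rfl

theorem pvStars_cons (c : Char) (u : List Char) :
    pvStars (c :: u) = pvStars u + (if c = '*' then 1 else 0) := by
  by_cases h : c = '*' <;> simp [pvStars, h]

theorem pvStars_append_singleton (u : List Char) (c : Char) :
    pvStars (u ++ [c]) = pvStars u + (if c = '*' then 1 else 0) := by
  by_cases h : c = '*' <;> simp [pvStars, List.count_append, h]


theorem pvSingletonPrefix (a : Char) (l : List Char) : [a] <+: l ↔ l.head? = some a := by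
  constructor
  · rintro ⟨t, rfl⟩; rfl
  · intro h
    cases l with
    | nil => simp at h
    | cons b t => simp at h; exact ⟨t, by simp [h]⟩

-- str.rfind('|'): spec of PySem.Chars.rfind.go for a single-character needle
theorem pvRfindGo (t : List Char) (j : Nat) (hj : ∀ i, j < i → t[i]? ≠ some '|') :
    ('|' ∈ t → ∃ l : Nat, PySem.Chars.rfind.go t ['|'] j = (l : Int) ∧
      t[l]? = some '|' ∧ ∀ i, l < i → t[i]? ≠ some '|') ∧
    ('|' ∉ t → PySem.Chars.rfind.go t ['|'] j = -1) := by
  induction j with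
  | zero =>
    rw [PySem.Chars.rfind.go]
    by_cases h0 : t[0]? = some '|'
    · have hp : List.isPrefixOf ['|'] t = true := by
        rw [List.isPrefixOf_iff_prefix, pvSingletonPrefix]
        simpa [List.head?_eq_getElem?] using h0
      constructor
      · intro _; exact ⟨0, by simp [hp], h0, fun i hi => hj i hi⟩
      · intro hmem; exact absurd (List.mem_iff_getElem?.mpr ⟨0, h0⟩) hmem
    · have hp : List.isPrefixOf ['|'] t ≠ true := by
        rw [ne_eq, List.isPrefixOf_iff_prefix, pvSingletonPrefix]
        simpa [List.head?_eq_getElem?] using h0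
      constructor
      · intro hmem
        obtain ⟨i, hi⟩ := List.mem_iff_getElem?.mp hmem
        rcases Nat.eq_zero_or_pos i with rfl | hpos
        · exact absurd hi h0
        · exact absurd hi (hj i hpos)
      · intro _; simp [hp]
  | succ j ih =>
    rw [PySem.Chars.rfind.go]
    by_cases h1 : t[j+1]? = some '|'
    · have hp : List.isPrefixOf ['|'] (t.drop (j+1)) = true := by
        rw [List.isPrefixOf_iff_prefix, pvSingletonPrefix, List.head?_drop]
        exact h1
      constructor
      · intro _
        exact ⟨j+1, by simp [hp], h1, fun i hi => hj i hi⟩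
      · intro hmem; exact absurd (List.mem_iff_getElem?.mpr ⟨j+1, h1⟩) hmem
    · have hp : List.isPrefixOf ['|'] (t.drop (j+1)) ≠ true := by
        rw [ne_eq, List.isPrefixOf_iff_prefix, pvSingletonPrefix, List.head?_drop]
        exact h1
      have hj' : ∀ i, j < i → t[i]? ≠ some '|' := by
        intro i hi
        rcases Nat.lt_or_ge (j+1) i with h | h
        · exact hj i h
        · have : i = j + 1 := by omega
          simpa [this] using h1
      obtain ⟨ih1, ih2⟩ := ih hj'
      constructor
      · intro hmem; obtain ⟨l, hl⟩ := ih1 hmem; exact ⟨l, by simp [hp, hl.1], hl.2⟩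
      · intro hmem; simp [hp, ih2 hmem]

theorem pvRfindSpec (t : List Char) (h : '|' ∈ t) :
    ∃ l : Nat, PySem.Chars.rfind t ['|'] = (l : Int) ∧
      t[l]? = some '|' ∧ ∀ i, l < i → t[i]? ≠ some '|' := by
  have hj : ∀ i, t.length < i → t[i]? ≠ some '|' := by
    intro i hi
    simp [List.getElem?_eq_none (by omega : t.length ≤ i)]
  exact (pvRfindGo t t.length hj).1 h

-- t.count('*') for the single-character needle is List.count
theorem pvCountGo (u : List Char) : ∀ (fuel acc : Nat), u.length ≤ fuel →
    PySem.Chars.count.go ['*'] fuel u acc = acc + u.count '*' := by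
  induction u with
  | nil => intro fuel acc _; cases fuel <;> rw [PySem.Chars.count.go] <;> simp
  | cons c u ih =>
    intro fuel acc hf
    cases fuel with
    | zero => simp at hf
    | succ fuel =>
      rw [PySem.Chars.count.go]
      by_cases hc : c = '*'
      · have hp : List.isPrefixOf ['*'] (c :: u) = true := by
          rw [List.isPrefixOf_iff_prefix, pvSingletonPrefix]; simp [hc]
        simp only [hp, if_true, List.length_singleton, List.drop_one, List.tail_cons]
        rw [ih fuel (acc+1) (by simpa using hf)]
        simp [hc]; omega
      · have hp : List.isPrefixOf ['*'] (c :: u) ≠ true := by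
          rw [ne_eq, List.isPrefixOf_iff_prefix, pvSingletonPrefix]; simp [hc]
        simp only [Bool.not_eq_true] at hp
        simp only [hp]
        rw [ih fuel acc (by simpa using Nat.le_of_succ_le_succ hf)]
        simp [hc]

theorem pvCountEq (u : List Char) : PySem.Chars.count u ['*'] = u.count '*' := by
  rw [PySem.Chars.count]
  simp [pvCountGo u u.length 0 le_rfl]

theorem pvDropWhileEq (t : List Char) (n : Nat) (hlt : ∀ i, i < n → t[i]? ≠ some '|')
    (hn : t[n]? = some '|') : t.dropWhile (fun c => c != '|') = t.drop n := by
  induction t generalizing n with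
  | nil => simp at hn
  | cons c u ih =>
    cases n with
    | zero => simp at hn; simp [hn]
    | succ n =>
      have hc : c ≠ '|' := by
        have := hlt 0 (Nat.succ_pos n); simpa using this
      rw [List.dropWhile_cons]
      simp only [bne_iff_ne, ne_eq, hc, not_false_iff, if_pos, List.drop_succ_cons]
      exact ih n (fun i hi => by simpa using hlt (i+1) (by omega)) (by simpa using hn)

theorem pvTakeRev (t : List Char) (l : Nat) (hl : t[l]? = some '|')
    (hgt : ∀ i, l < i → t[i]? ≠ some '|') :
    t.reverse.takeWhile (fun c => c != '|') = (t.drop (l+1)).reverse := by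
  have hllt : l < t.length := by
    by_contra h
    rw [List.getElem?_eq_none (by omega)] at hl; simp at hl
  conv_lhs => rw [← List.take_append_drop (l+1) t]
  rw [List.reverse_append, List.takeWhile_append]
  have hall : (t.drop (l+1)).reverse.takeWhile (fun c => c != '|') = (t.drop (l+1)).reverse := by
    rw [List.takeWhile_eq_self_iff]
    intro x hx
    rw [List.mem_reverse, List.mem_iff_getElem?] at hx
    obtain ⟨i, hi⟩ := hx
    rw [List.getElem?_drop] at hi
    have := hgt (l+1+i) (by omega)
    simp only [bne_iff_ne, ne_eq]
    intro hx'; exact this (hx' ▸ hi)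
  rw [hall]
  simp only [List.length_reverse]
  have htake : t.take (l+1) = t.take l ++ ['|'] := by
    rw [List.take_add_one]
    congr 1
    rw [List.getElem?_eq_getElem hllt] at hl ⊢
    simp [Option.some.injEq] at hl
    simp [hl]
  rw [htake, List.reverse_append]
  simp

theorem pvCountSlice (t : List Char) (f l : Nat) (hfl : f ≤ l) (hl : l < t.length)
    (hpipe : t[l]? = some '|') :
    (((t.drop f).take (l - f)).count '*' : Int) = pvStars (t.drop f) - pvStars (t.drop (l+1)) := by
  have hsplit : (t.drop f).count '*' =
      ((t.drop f).take (l - f)).count '*' + ((t.drop f).drop (l - f)).count '*' := by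
    conv_lhs => rw [← List.take_append_drop (l - f) (t.drop f)]
    rw [List.count_append]
  have hdd : (t.drop f).drop (l - f) = t.drop l := by
    rw [List.drop_drop]; congr 1; omega
  have hcons : t.drop l = '|' :: t.drop (l+1) := by
    rw [List.drop_eq_getElem_cons hl]
    congr 1
    rw [List.getElem?_eq_getElem hl] at hpipe
    simpa using hpipe
  have hcnt : (t.drop l).count '*' = (t.drop (l+1)).count '*' := by
    rw [hcons, List.count_cons]; simp
  rw [hdd, hcnt] at hsplit
  simp only [pvStars]
  omega

theorem pvFoldA (t : List Char) :
    t.foldl qsn2Step (false, 0, 0) =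
      if '|' ∈ t then
        (true,
          pvStars (t.dropWhile (fun c => c != '|')) - pvStars (t.reverse.takeWhile (fun c => c != '|')),
          pvStars (t.reverse.takeWhile (fun c => c != '|')))
      else (false, 0, 0) := by
  induction t using List.reverseRecOn with
  | nil => simp
  | append_singleton p c ih =>
    rw [List.foldl_append, ih]
    have hrev : (p ++ [c]).reverse = c :: p.reverse := by simp
    by_cases hp : '|' ∈ p
    · have hne : (p.dropWhile (fun c => c != '|')).isEmpty ≠ true := by
        simp only [ne_eq, List.isEmpty_iff, List.dropWhile_eq_nil_iff]
        push Not
        exact ⟨'|', hp, by simp⟩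
      have hdw : (p ++ [c]).dropWhile (fun c => c != '|') =
          p.dropWhile (fun c => c != '|') ++ [c] := by
        rw [List.dropWhile_append]; simp [hne]
      by_cases hc : c = '|'
      · subst hc
        simp only [hp, if_true, List.mem_append, List.mem_singleton, or_true, hrev, hdw]
        simp [qsn2Step, pvStars_append_singleton, pvStars_nil]
      · by_cases hs : c = '*'
        · subst hs
          simp only [hp, if_true, List.mem_append, List.mem_singleton, hrev, hdw]
          simp [qsn2Step, pvStars_append_singleton, pvStars_cons, hc]
        · simp only [hp, if_true, List.mem_append, List.mem_singleton, hrev, hdw]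
          simp [qsn2Step, pvStars_append_singleton, pvStars_cons, hc, hs]
    · have hdwp : p.dropWhile (fun c => c != '|') = [] := by
        rw [List.dropWhile_eq_nil_iff]; intro x hx; simp; intro h; exact hp (h ▸ hx)
      have hdw : (p ++ [c]).dropWhile (fun c => c != '|') = [c].dropWhile (fun c => c != '|') := by
        rw [List.dropWhile_append]; simp [hdwp]
      by_cases hc : c = '|'
      · subst hc
        simp only [hp, if_false, List.mem_append, List.mem_singleton, or_true, hrev, hdw]
        simp [qsn2Step, pvStars]
      · simp only [hp, List.mem_append, List.mem_singleton, hrev, hdw]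
        have hc' : ¬ '|' = c := fun h => hc h.symm
        simp [qsn2Step, hc, hc']

-- the per-slice answers agree: A's scan equals B's find/rfind/count
theorem pvAnsEq (t : List Char) : (t.foldl qsn2Step (false, 0, 0)).2.1 = qsn2AltAns t := by
  rw [pvFoldA]
  by_cases hmem : '|' ∈ t
  · have hinf : ['|'] <:+: t := (List.singleton_infix_iff _ _).mpr hmem
    have hfnn : 0 ≤ PySem.Chars.find t ['|'] := (PySem.Chars.find_nonneg_iff t ['|']).mpr hinf
    obtain ⟨hpre, hmin⟩ := PySem.Chars.find_spec hfnn
    have hfeq : PySem.Chars.find t ['|'] = ((PySem.Chars.find t ['|']).toNat : Int) :=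
      (Int.toNat_of_nonneg hfnn).symm
    set fN := (PySem.Chars.find t ['|']).toNat with hfN
    have hfp : t[fN]? = some '|' := by
      rw [pvSingletonPrefix, List.head?_drop] at hpre; exact hpre
    have hflt : ∀ i, i < fN → t[i]? ≠ some '|' := by
      intro i hi hcontra
      exact hmin i hi ((pvSingletonPrefix _ _).mpr (by rw [List.head?_drop]; exact hcontra))
    obtain ⟨lN, hrf, hlp, hgt⟩ := pvRfindSpec t hmem
    have hfl : fN ≤ lN := by
      by_contra h
      exact hgt fN (by omega) hfp
    have hllen : lN < t.length := by
      by_contra h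
      rw [List.getElem?_eq_none (by omega)] at hlp; simp at hlp
    have hne : ((fN : Int)) ≠ -1 := by omega
    simp only [qsn2AltAns, hfeq, hrf, if_neg hne, PySem.List.slice_natCast, pvCountEq]
    rw [if_pos hmem, pvDropWhileEq t fN hflt hfp, pvTakeRev t lN hlp hgt, pvCountSlice t fN lN hfl hllen hlp]
    simp [pvStars, List.count_reverse]
  · have hf : PySem.Chars.find t ['|'] = -1 :=
      (PySem.Chars.find_eq_neg_one_iff t ['|']).mpr (fun h => hmem ((List.singleton_infix_iff _ _).mp h))
    simp [qsn2AltAns, hf, hmem]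

-- ===== VERDICT (by name: the statement is the Claim_ definition above) =====
theorem qsn2_spec : Claim_equal_qsn2 := by
  intro s st_idx end_idx _
  unfold Spec_qsn2 qsn2 qsn2_alt
  simp only [PySem.List.foldl_append_singleton_eq_map, List.nil_append]
  exact List.map_congr_left (fun ij _ => pvAnsEq _)
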